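-- pv_equiv track=rewrite | github.com/klee972/VLind-Bench | eval/instructblip_eval.py | infer_true_or_false
-- ===== SOURCE A (Python) =====
-- def infer_true_or_false(response):
--     normalized_response = response.lower().replace('\n', ' ').replace(',', '').replace('.', '').split(' ')
--     for word in normalized_response:
--         if word == 'true':
--             return 'True'
--         elif word == 'false':
--             return 'False'
--     return 'NA'
-- ===== SOURCE B (Python) =====
-- def infer_true_or_false(response):
--     words = response.lower().replace('\n', ' ').replace(',', '').replace('.', '').split(' ')
--     n = len(words)
--     ti = words.index('true') if 'true' in words else n
--     fi = words.index('false') if 'false' in words else n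
--     if ti < fi:
--         return 'True'
--     if fi < ti:
--         return 'False'
--     return 'NA'
-- ===== Notes on version B (the rewrite author's own statement) =====
-- stated objective: alternative
-- what changed: Replaces the single early-exit scan over the word list with two positional probes (first index of 'true' and of 'false', defaulting to the list length when absent) compared arithmetically to pick the verdict.
import Mathlib
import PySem

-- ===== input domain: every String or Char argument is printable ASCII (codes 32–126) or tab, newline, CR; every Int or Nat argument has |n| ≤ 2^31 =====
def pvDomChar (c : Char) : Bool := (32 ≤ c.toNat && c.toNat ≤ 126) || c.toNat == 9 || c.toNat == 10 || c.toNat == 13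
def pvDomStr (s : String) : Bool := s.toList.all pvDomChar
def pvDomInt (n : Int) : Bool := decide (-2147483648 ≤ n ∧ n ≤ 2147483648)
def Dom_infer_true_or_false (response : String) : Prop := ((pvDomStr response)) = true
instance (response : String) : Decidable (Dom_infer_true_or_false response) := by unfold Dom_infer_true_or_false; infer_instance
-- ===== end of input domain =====

-- B replaces A's early-exit scan of the word list with two first-index probes (of 'true' and 'false') compared arithmetically; same result, same cost.
-- ===== PORT A =====
-- Early-exit scan over the normalized word list.
def pvScanA : List String → String
  | [] => "NA"
  | w :: ws => if w = "true" then "True" else if w = "false" then "False" else pvScanA ws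

def infer_true_or_false (response : String) : String :=
  let normalized_response :=
    -- split(' '): the separator is the nonempty literal " ", so Python's split never raises and split? is always `some`
    (PySem.Str.split?
      (PySem.Str.replace (PySem.Str.replace (PySem.Str.replace (PySem.Str.lower response) "\n" " ") "," "") "." "")
      " ").getD []
  pvScanA normalized_response

-- ===== PORT B =====
-- B: first index of 'true' and of 'false' (defaulting to the list length), compared.
def infer_true_or_false_alt (response : String) : String :=
  let words :=
    -- split(' '): the separator is the nonempty literal " ", so Python's split never raises and split? is always `some`
    (PySem.Str.split?
      (PySem.Str.replace (PySem.Str.replace (PySem.Str.replace (PySem.Str.lower response) "\n" " ") "," "") "." "")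
      " ").getD []
  let n := words.length
  let ti := (PySem.List.index? words "true").getD n
  let fi := (PySem.List.index? words "false").getD n
  if ti < fi then "True" else if fi < ti then "False" else "NA"


-- ===== PRECONDITION & SPEC =====
def Spec_infer_true_or_false (response : String) (out : String) : Prop := out = infer_true_or_false_alt response
instance (response : String) (out : String) : Decidable (Spec_infer_true_or_false response out) := by unfold Spec_infer_true_or_false; infer_instance

-- ===== CLAIM (what is proved, stated in full; the proofs are below) =====
def Claim_equal_infer_true_or_false : Prop := ∀ (response : String), Dom_infer_true_or_false response → Spec_infer_true_or_false response (infer_true_or_false response)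

-- ===== LEMMAS AND PROOFS =====


theorem pvScan_eq_index (ws : List String) :
    pvScanA ws =
      (if (PySem.List.index? ws "true").getD ws.length < (PySem.List.index? ws "false").getD ws.length then "True"
       else if (PySem.List.index? ws "false").getD ws.length < (PySem.List.index? ws "true").getD ws.length then "False"
       else "NA") := by
  induction ws with
  | nil => simp [pvScanA]
  | cons w ws ih =>
    by_cases ht : w = "true"
    · subst ht
      have hf : (PySem.List.index? ("true" :: ws) "false").getD (ws.length + 1) ≥ 1 := by
        rw [PySem.List.index?_cons_of_ne _ (by decide)]
        cases h : PySem.List.index? ws "false" <;> simp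
      simp only [pvScanA, PySem.List.index?_cons_self, List.length_cons, Option.getD_some]
      split_ifs with h1 h2 <;> first | rfl | omega
    · by_cases hf : w = "false"
      · subst hf
        have ht2 : (PySem.List.index? ("false" :: ws) "true").getD (ws.length + 1) ≥ 1 := by
          rw [PySem.List.index?_cons_of_ne _ (by decide)]
          cases h : PySem.List.index? ws "true" <;> simp
        simp only [pvScanA, PySem.List.index?_cons_self, List.length_cons, Option.getD_some]
        split_ifs with h1 h2 <;> first | rfl | omega
      · have e1 : (PySem.List.index? (w :: ws) "true").getD (w :: ws).length
            = (PySem.List.index? ws "true").getD ws.length + 1 := by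
          rw [PySem.List.index?_cons_of_ne _ ht]
          cases h : PySem.List.index? ws "true" <;> simp
        have e2 : (PySem.List.index? (w :: ws) "false").getD (w :: ws).length
            = (PySem.List.index? ws "false").getD ws.length + 1 := by
          rw [PySem.List.index?_cons_of_ne _ hf]
          cases h : PySem.List.index? ws "false" <;> simp
        rw [e1, e2]
        simp only [pvScanA, if_neg ht, if_neg hf, ih]
        split_ifs with h1 h2 h3 h4 <;> first | rfl | omega

-- ===== VERDICT (by name: the statement is the Claim_ definition above) =====
theorem infer_true_or_false_spec : Claim_equal_infer_true_or_false := by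
  intro response _
  unfold Spec_infer_true_or_false infer_true_or_false infer_true_or_false_alt
  exact pvScan_eq_index _
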